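-- pv_equiv track=rewrite | github.com/Rohithyeravothula/leetcode | lastSubstring.py | compute_decent
-- ===== SOURCE A (Python) =====
-- def compute_decent(s):
-- 	l = len(s)
-- 	i = 0
-- 	ans = None
-- 	while i<l:
-- 		cur = s[i]
-- 		j = i
-- 		while j<l and s[j] <= s[i]:
-- 			j+=1
-- 		if not ans or s[i:j] > ans:
-- 			ans = s[i:j]
-- 		i=j
-- 	return ans
-- ===== SOURCE B (Python) =====
-- def compute_decent(s):
--     if not s:
--         return None
--     return s[s.index(max(s)):]
-- ===== Notes on version B (the rewrite author's own statement) =====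
-- stated objective: simpler
-- what changed: Replaces the segment-partition loop with a running best by a closed form: since each new segment starts with a strictly larger character, the answer is exactly the suffix starting at the first occurrence of the maximum character, so B is s[s.index(max(s)):] (None for empty s).
import Mathlib
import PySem

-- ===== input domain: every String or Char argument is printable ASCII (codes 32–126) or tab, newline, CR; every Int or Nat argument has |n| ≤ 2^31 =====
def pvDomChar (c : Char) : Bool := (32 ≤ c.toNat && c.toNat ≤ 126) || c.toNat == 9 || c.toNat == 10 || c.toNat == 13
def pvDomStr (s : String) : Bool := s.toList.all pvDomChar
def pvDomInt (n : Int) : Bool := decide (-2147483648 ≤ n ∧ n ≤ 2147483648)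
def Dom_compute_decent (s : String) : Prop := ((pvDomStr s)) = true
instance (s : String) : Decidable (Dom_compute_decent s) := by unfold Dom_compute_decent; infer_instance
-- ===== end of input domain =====

-- B replaces A's running-best segment loop by the closed form s[s.index(max(s)):] (objective: simpler).

-- ===== PORT A =====
-- inner while loop: 'while j < l and s[j] <= s[i]: j += 1'
def pvAInner (cs : List Char) (c : Char) (j : Nat) : Nat :=
  if h : j < cs.length then
    if cs[j] ≤ c then pvAInner cs c (j + 1) else j
  else j
termination_by cs.length - j

-- the inner loop advances past j when it can take a step (needed for outer termination)
theorem pvAInner_ge (cs : List Char) (c : Char) (j : Nat) : j ≤ pvAInner cs c j := by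
  fun_induction pvAInner cs c j with
  | case1 j h hle ih => omega
  | case2 j h hle => omega
  | case3 j h => omega

theorem pvAInner_gt (cs : List Char) (c : Char) (j : Nat) (h : j < cs.length)
    (hle : cs[j] ≤ c) : j < pvAInner cs c j := by
  have := pvAInner_ge cs c (j + 1)
  unfold pvAInner
  simp [h, hle]
  omega

-- outer while loop: i walks segment to segment, keeping the best slice in ans
def pvAOuter (cs : List Char) (i : Nat) (ans : Option (List Char)) : Option (List Char) :=
  if h : i < cs.length then
    let j := pvAInner cs cs[i] i
    let seg := PySem.List.slice cs (some (i : Int)) (some (j : Int))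
    let ans' := if (match ans with
                    | none => true
                    | some a => a.isEmpty || decide (a < seg)) then some seg else ans
    pvAOuter cs j ans'
  else ans
termination_by cs.length - i
decreasing_by
  have := pvAInner_gt cs cs[i] i h le_rfl
  omega

def compute_decent (s : String) : Option String :=
  (pvAOuter s.toList 0 none).map String.ofList

-- ===== PORT B =====
-- Source B: if not s: return None; return s[s.index(max(s)):]
def compute_decent_alt (s : String) : Option String :=
  let cs := s.toList
  if cs.isEmpty then none
  else
    match PySem.List.max? cs (fun c => c) with
    | none => none        -- unreachable: cs nonempty
    | some m =>
      match PySem.List.index? cs m with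
      | none => none      -- unreachable: max(s) occurs in s
      | some k => some (String.ofList (PySem.List.slice cs (some (k : Int)) none))

-- ===== PRECONDITION & SPEC =====
def Spec_compute_decent (s : String) (out : Option String) : Prop := out = compute_decent_alt s
instance (s : String) (out : Option String) : Decidable (Spec_compute_decent s out) := by unfold Spec_compute_decent; infer_instance

-- ===== CLAIM (what is proved, stated in full; the proofs are below) =====
def Claim_equal_compute_decent : Prop := ∀ (s : String), Dom_compute_decent s → Spec_compute_decent s (compute_decent s)

-- ===== LEMMAS AND PROOFS =====

-- position where A's outer loop takes its last segment
def pvLastStart (cs : List Char) (i : Nat) : Nat :=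
  if h : i < cs.length then
    let j := pvAInner cs cs[i] i
    if j < cs.length then pvLastStart cs j else i
  else i
termination_by cs.length - i
decreasing_by
  have := pvAInner_gt cs cs[i] i h le_rfl
  omega

theorem pvAInner_le (cs : List Char) (c : Char) (j : Nat) (h : j ≤ cs.length) :
    pvAInner cs c j ≤ cs.length := by
  fun_induction pvAInner cs c j with
  | case1 j h' hle ih => exact ih (by omega)
  | case2 j h' hle => omega
  | case3 j h' => omega

theorem pvAInner_stop (cs : List Char) (c : Char) (j : Nat)
    (h : pvAInner cs c j < cs.length) : c < cs[pvAInner cs c j] := by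
  fun_induction pvAInner cs c j with
  | case1 j h' hle ih => exact ih h
  | case2 j h' hle => exact lt_of_not_ge (by simpa using hle)
  | case3 j h' => omega

theorem pvAInner_within (cs : List Char) (c : Char) (j : Nat) :
    ∀ k (hk : k < cs.length), j ≤ k → k < pvAInner cs c j → cs[k] ≤ c := by
  fun_induction pvAInner cs c j with
  | case1 j h' hle ih =>
    intro k hk hjk hkr
    rcases Nat.eq_or_lt_of_le hjk with rfl | hlt
    · exact hle
    · exact ih k hk hlt hkr
  | case2 j h' hle => intro k hk hjk hkr; omega
  | case3 j h' => intro k hk hjk hkr; omega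

theorem pvLastStart_spec (cs : List Char) : ∀ i, i < cs.length →
    i ≤ pvLastStart cs i ∧ pvLastStart cs i < cs.length ∧
    (∀ k (hk : k < cs.length) (hp : pvLastStart cs i < cs.length),
        i ≤ k → cs[k] ≤ cs[pvLastStart cs i]) ∧
    (∀ k (hk : k < cs.length) (hp : pvLastStart cs i < cs.length),
        i ≤ k → k < pvLastStart cs i → cs[k] < cs[pvLastStart cs i]) := by
  intro i hi
  fun_induction pvLastStart cs i with
  | case1 i h j hj ih =>
    have hji : i < j := pvAInner_gt cs cs[i] i h le_rfl
    obtain ⟨h1, h2, h3, h4⟩ := ih hj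
    have hjp : cs[j] ≤ cs[pvLastStart cs j] := h3 j hj h2 le_rfl
    have hstop : cs[i] < cs[j] := pvAInner_stop cs cs[i] i hj
    refine ⟨by omega, h2, ?_, ?_⟩
    · intro k hk hp hik
      by_cases hkj : j ≤ k
      · exact h3 k hk hp hkj
      · have : cs[k] ≤ cs[i] := pvAInner_within cs cs[i] i k hk hik (by omega)
        exact le_trans this (le_trans (le_of_lt hstop) hjp)
    · intro k hk hp hik hkp
      by_cases hkj : j ≤ k
      · exact h4 k hk hp hkj hkp
      · have : cs[k] ≤ cs[i] := pvAInner_within cs cs[i] i k hk hik (by omega)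
        exact lt_of_le_of_lt this (lt_of_lt_of_le hstop hjp)
  | case2 i h j hj =>
    refine ⟨le_rfl, h, ?_, ?_⟩
    · intro k hk hp hik
      exact pvAInner_within cs cs[i] i k hk hik (by omega)
    · intro k hk hp hik hkp; omega
  | case3 i h => omega

-- lexicographic: a list headed by a smaller char is smaller
theorem pvLex_head {a b : Char} (u v : List Char) (h : a < b) :
    (a :: u) < (b :: v) := by
  exact List.Lex.rel h

-- A's outer loop, once its invariant holds, returns the final segment cs.drop (pvLastStart cs i)
theorem pvAOuter_spec (cs : List Char) : ∀ n i ans, cs.length - i = n → ∀ (hi : i < cs.length),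
    (ans = none ∨ ∃ a t, ans = some (a :: t) ∧ a < cs[i]) →
    pvAOuter cs i ans = some (cs.drop (pvLastStart cs i)) := by
  intro n
  induction n using Nat.strong_induction_on with
  | _ n ih =>
    intro i ans hn hi hinv
    have hji : i < pvAInner cs cs[i] i := pvAInner_gt cs cs[i] i hi le_rfl
    have hjle : pvAInner cs cs[i] i ≤ cs.length := pvAInner_le cs cs[i] i (by omega)
    set j := pvAInner cs cs[i] i with hj
    have hseg : PySem.List.slice cs (some (i : Int)) (some (j : Int))
        = (cs.drop i).take (j - i) := PySem.List.slice_natCast cs i j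
    have hdrop : cs.drop i = cs[i] :: cs.drop (i + 1) := List.drop_eq_getElem_cons hi
    obtain ⟨d, hd⟩ : ∃ d, j - i = d + 1 := ⟨j - i - 1, by omega⟩
    have hsegcons : (cs.drop i).take (j - i) = cs[i] :: (cs.drop (i + 1)).take d := by
      rw [hd, hdrop, List.take_succ_cons]
    -- after the update, ans holds the current segment, and the loop continues from j
    have hnext : pvAOuter cs j (some (PySem.List.slice cs (some (i : Int)) (some (j : Int))))
        = some (cs.drop (pvLastStart cs i)) := by
      by_cases hjl : j < cs.length
      · have hstop : cs[i] < cs[j] := pvAInner_stop cs cs[i] i hjl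
        have hrec := ih (cs.length - j) (by omega) j
          (some (PySem.List.slice cs (some (i : Int)) (some (j : Int)))) rfl hjl
          (Or.inr ⟨cs[i], (cs.drop (i + 1)).take d, by rw [hseg, hsegcons], hstop⟩)
        have hstep : pvLastStart cs i = pvLastStart cs j := by
          rw [pvLastStart]
          simp [hi, ← hj, hjl]
        rw [hrec, hstep]
      · have hjend : j = cs.length := by omega
        rw [pvAOuter]
        simp only [hjl, dif_neg, not_false_iff]
        rw [pvLastStart]
        simp only [hi, dif_pos, ← hj, hjl, if_neg, not_false_iff]
        rw [hseg, hjend]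
        congr 1
        have hlen : cs.length - i = (cs.drop i).length := by simp
        rw [hlen, List.take_length]
    rw [pvAOuter]
    simp only [hi, dif_pos, ← hj]
    rcases hinv with rfl | ⟨a, t, rfl, hlt⟩
    · simpa using hnext
    · have hcmp : (a :: t) < PySem.List.slice cs (some (i : Int)) (some (j : Int)) := by
        rw [hseg, hsegcons]
        exact pvLex_head t _ hlt
      simpa [hcmp] using hnext

-- B's index?: the first occurrence of the max char is pvLastStart cs 0
theorem pvB_index (cs : List Char) (h : cs ≠ []) (m : Char)
    (hmax : PySem.List.max? cs (fun c => c) = some m) :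
    PySem.List.index? cs m = some (pvLastStart cs 0) := by
  have hlen : 0 < cs.length := List.length_pos_of_ne_nil h
  obtain ⟨h1, h2, h3, h4⟩ := pvLastStart_spec cs 0 hlen
  set p := pvLastStart cs 0 with hp
  have hmem : m ∈ cs := PySem.List.max?_mem hmax
  have hub : ∀ y ∈ cs, y ≤ m := by
    intro y hy; exact PySem.List.max?_isMax hmax y hy
  have hpm : cs[p] = m := by
    obtain ⟨q, hq, rfl⟩ := List.getElem_of_mem hmem
    exact le_antisymm (hub cs[p] (List.getElem_mem h2)) (h3 q hq h2 (Nat.zero_le q))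
  rw [PySem.List.index?_eq_some_iff]
  refine ⟨cs.take p, cs.drop (p + 1), ?_, ?_, ?_⟩
  · rw [← hpm]
    conv_lhs => rw [← List.take_append_drop p cs, List.drop_eq_getElem_cons h2]
  · simp [List.length_take, Nat.min_eq_left (le_of_lt h2)]
  · intro hmemtake
    obtain ⟨k, hk, hkv⟩ := List.getElem_of_mem hmemtake
    have hkp : k < p := by simp at hk; omega
    have hkl : k < cs.length := by omega
    rw [List.getElem_take] at hkv
    have := h4 k hkl h2 (Nat.zero_le k) hkp
    rw [hkv, hpm] at this
    exact absurd this (lt_irrefl m)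

-- ===== VERDICT (by name: the statement is the Claim_ definition above) =====
theorem compute_decent_spec : Claim_equal_compute_decent := by
  unfold Claim_equal_compute_decent
  intro s _
  unfold Spec_compute_decent compute_decent compute_decent_alt
  by_cases h : s.toList = []
  · simp [h, pvAOuter]
  · have hlen : 0 < s.toList.length := List.length_pos_of_ne_nil h
    have hA := pvAOuter_spec s.toList (s.toList.length - 0) 0 none rfl hlen (Or.inl rfl)
    rw [hA]
    obtain ⟨m, hm⟩ : ∃ m, PySem.List.max? s.toList (fun c => c) = some m := by
      rcases hmx : PySem.List.max? s.toList (fun c => c) with _ | m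
      · exact absurd ((PySem.List.max?_eq_none_iff _ _).mp hmx) h
      · exact ⟨m, rfl⟩
    rw [if_neg (by simpa using h)]
    simp only [hm, pvB_index s.toList h m hm, Option.map_some]
    congr 2
    exact (PySem.List.slice_from_natCast ..).symm
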